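-- pv_equiv track=rewrite | github.com/JasperJunghyunKim/algorithm | Programmers/여행경로-2.py | solution
-- ===== SOURCE A (Python) =====
-- def solution(tickets):
--     answer = []
--
--     tickets.sort(key = lambda x : (x[0], x[1]))
--
--     stack = []
--     is_used = [False for _ in range(len(tickets))]
--     cur_city = "ICN"
--     answer.append(cur_city)
--     for t_no, t in enumerate(tickets):
--         if t[0] == "ICN":
--             stack.append(t)
--             is_used[t_no] = True
--             break
--
--     while stack:
--         cur_ticket = stack.pop()
--         cur_city = cur_ticket[1]
--         answer.append(cur_city)
--         for t_no, t in enumerate(tickets):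
--             if t[0] == cur_city and not is_used[t_no]:
--                 stack.append(t)
--                 is_used[t_no] = True
--                 break
--
--     return answer
-- ===== SOURCE B (Python) =====
-- def solution(tickets):
--     # Greedy walk from "ICN": a dict city -> destinations sorted in DESCENDING
--     # order, so each step takes the lexicographically smallest unused destination
--     # by popping from the end.  (Unlike A, this does not mutate `tickets`.)
--     routes = {}
--     for t in tickets:
--         routes.setdefault(t[0], []).append(t[1])
--     for ds in routes.values():
--         ds.sort(reverse=True)
--     answer = ["ICN"]
--     cur = "ICN"
--     while routes.get(cur):
--         cur = routes[cur].pop()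
--         answer.append(cur)
--     return answer
-- ===== Notes on version B (the rewrite author's own statement) =====
-- stated objective: alternative
-- what changed: A rescans the whole globally-sorted ticket list (with a used-flag array) to find the next unused ticket at every step of the greedy walk; B instead groups the tickets once into a dict city -> destination list, sorts each list descending, and pops the smallest destination from the end of the current city's list at each step (B also does not mutate `tickets`, while A sorts it in place).
-- outside the precondition, e.g. on solution([['ICN']]): A raises IndexError, B raises IndexError
import Mathlib
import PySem

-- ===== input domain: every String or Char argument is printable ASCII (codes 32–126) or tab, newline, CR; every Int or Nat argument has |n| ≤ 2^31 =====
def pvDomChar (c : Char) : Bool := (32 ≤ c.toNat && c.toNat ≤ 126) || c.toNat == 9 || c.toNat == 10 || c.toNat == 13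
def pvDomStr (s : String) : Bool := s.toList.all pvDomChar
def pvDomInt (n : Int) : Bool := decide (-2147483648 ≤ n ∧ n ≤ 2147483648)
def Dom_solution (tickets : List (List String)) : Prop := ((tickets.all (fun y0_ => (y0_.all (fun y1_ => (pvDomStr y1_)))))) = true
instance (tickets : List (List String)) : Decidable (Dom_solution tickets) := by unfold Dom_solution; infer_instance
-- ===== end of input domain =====

-- B replaces A's per-step rescan of the globally sorted ticket list (with a used-flag
-- array) by a dict city -> descending-sorted destination list popped from the end
-- (objective: alternative strategy/data structure; a timing run measured no speed-up).
-- A sorts `tickets` in place (B does not mutate); the equivalence claimed is about the return value.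

-- ===== PORT A =====
-- the inner `for t_no, t in enumerate(tickets): if t[0] == c and not is_used[t_no]:
--   stack.append(t); is_used[t_no] = True; break` — its whole effect: the first
-- unused ticket leaving c (if any) together with the updated flag list
def markFirst (ts : List (List String)) (used : List Bool) (c : String) :
    Option (List String × List Bool) :=
  match ts, used with
  | [], _ => none
  | _ :: _, [] => none   -- unreachable: is_used has the same length as tickets
  | t :: ts, b :: bs =>
    if PySem.List.pyGetD t 0 "" = c ∧ b = false then some (t, true :: bs)
    else
      match markFirst ts bs c with
      | none => none
      | some (t', bs') => some (t', b :: bs')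

-- termination helper for loopA: a successful markFirst flips one False flag to True
lemma markFirst_count (ts : List (List String)) : ∀ (used : List Bool) (c : String)
    (t' : List String) (bs' : List Bool), markFirst ts used c = some (t', bs') →
    bs'.count false + 1 = used.count false := by
  induction ts with
  | nil => intro used c t' bs' h; simp [markFirst] at h
  | cons t ts ih =>
    intro used c t' bs' h
    cases used with
    | nil => simp [markFirst] at h
    | cons b bs =>
      rw [markFirst] at h
      split at h
      · rename_i hc
        obtain ⟨-, rfl⟩ := hc
        simp only [Option.some.injEq, Prod.mk.injEq] at h
        obtain ⟨rfl, rfl⟩ := h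
        simp
      · cases hm : markFirst ts bs c with
        | none => rw [hm] at h; simp at h
        | some r =>
          rw [hm] at h
          obtain ⟨t₀, bs₀⟩ := r
          simp only [Option.some.injEq, Prod.mk.injEq] at h
          obtain ⟨rfl, rfl⟩ := h
          have := ih bs c t₀ bs₀ hm
          simp [List.count_cons]
          omega

-- the `while stack:` loop of A (Python pushes/pops at the same end of `stack`,
-- represented here at the head; the stack never holds more than one ticket)
def loopA (S : List (List String)) (stack : List (List String)) (used : List Bool)
    (answer : List String) : List String :=
  match stack with
  | [] => answer
  | t :: st =>
    -- cur_ticket = stack.pop(); cur_city = cur_ticket[1]; answer.append(cur_city)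
    let c := PySem.List.pyGetD t 1 ""
    match h : markFirst S used c with
    | none => loopA S st used (answer ++ [c])
    | some (t', used') => loopA S (t' :: st) used' (answer ++ [c])
termination_by 2 * used.count false + stack.length
decreasing_by
  · simp only [List.length_cons]; omega
  · have := markFirst_count S used c t' used' h
    simp only [List.length_cons]; omega

def solution (tickets : List (List String)) : List String :=
  -- tickets.sort(key=lambda x: (x[0], x[1]))  (in place in Python)
  let S := PySem.List.sorted2 tickets
            (fun x => PySem.List.pyGetD x 0 "") (fun x => PySem.List.pyGetD x 1 "")
  let answer : List String := ["ICN"]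
  let is_used := List.replicate tickets.length false
  -- the first for-loop: push the first ticket leaving "ICN"
  match markFirst S is_used "ICN" with
  | none => answer
  | some (t, used') => loopA S [t] used' answer

-- ===== PORT B =====
-- the `while routes.get(cur):` loop of B; fuel is a totality guard only (one
-- destination is consumed per turn, so fuel = number of tickets is never exhausted)
def loopB : Nat → PySem.Dict String (List String) → String → List String → List String
  | 0, _, _, answer => answer
  | fuel + 1, routes, cur, answer =>
    match (routes.get? cur).getD [] with   -- routes.get(cur): missing key or [] ends the walk
    | [] => answer
    | d :: ds =>
      let nxt := (d :: ds).getLast (by simp)   -- routes[cur].pop() takes the LAST element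
      loopB fuel (routes.insert cur (d :: ds).dropLast) nxt (answer ++ [nxt])

def solution_alt (tickets : List (List String)) : List String :=
  -- routes.setdefault(t[0], []).append(t[1])
  let routes := tickets.foldl
    (fun d t => d.modify (PySem.List.pyGetD t 0 "") [] (· ++ [PySem.List.pyGetD t 1 ""]))
    PySem.Dict.empty
  -- ds.sort(reverse=True) for every value list: smallest destination at the end
  let routes := PySem.Dict.mk (routes.items.map (fun p => (p.1, PySem.List.sorted p.2 (fun x => x) true)))
  loopB tickets.length routes "ICN" ["ICN"]

-- ===== PRECONDITION & SPEC =====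
-- Pre_ excludes tickets with fewer than two fields: there Python A raises IndexError
-- (in the sort key or on t[0]/t[1]), and Python B raises likewise.
def Pre_solution (tickets : List (List String)) : Prop := ∀ t ∈ tickets, 2 ≤ t.length
instance (tickets : List (List String)) : Decidable (Pre_solution tickets) := by
  unfold Pre_solution; infer_instance

def pvWitness_solution : List (List String) := [["ICN", "BBB"], ["BBB", "ICN"], ["ICN", "AAA"]]

def Spec_solution (tickets : List (List String)) (out : List String) : Prop := out = solution_alt tickets
instance (tickets : List (List String)) (out : List String) : Decidable (Spec_solution tickets out) := by unfold Spec_solution; infer_instance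

-- ===== CLAIM (what is proved, stated in full; the proofs are below) =====
def Claim_equal_solution : Prop := ∀ (tickets : List (List String)), Dom_solution tickets → Pre_solution tickets → Spec_solution tickets (solution tickets)

-- ===== LEMMAS AND PROOFS =====

-- a ticket seen as its (source, destination) pair
def prT (t : List String) : String × String :=
  (PySem.List.pyGetD t 0 "", PySem.List.pyGetD t 1 "")

-- the tickets whose flag is still False, as pairs, in list order
def unu : List (List String) → List Bool → List (String × String)
  | [], _ => []
  | _ :: _, [] => []
  | t :: ts, b :: bs => if b then unu ts bs else prT t :: unu ts bs

-- the common abstraction: greedy walk on a remaining-ticket list; each step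
-- takes the FIRST remaining pair leaving `cur` and removes it
def walkW (rem : List (String × String)) (cur : String) : List String :=
  match h : rem.find? (fun p => p.1 == cur) with
  | none => []
  | some p => p.2 :: walkW (rem.eraseP (fun p => p.1 == cur)) p.2
termination_by rem.length
decreasing_by
  have hmem := List.mem_of_find?_eq_some h
  have hp := List.find?_some h
  have := List.length_eraseP_of_mem (p := fun p => p.1 == cur) hmem hp
  have : 0 < rem.length := List.length_pos_of_mem hmem
  omega

lemma markFirst_none (ts : List (List String)) : ∀ (used : List Bool) (c : String),
    markFirst ts used c = none →
    (unu ts used).find? (fun p => p.1 == c) = none := by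
  induction ts with
  | nil => intro used c _; cases used <;> simp [unu]
  | cons t ts ih =>
    intro used c h
    cases used with
    | nil => simp [unu]
    | cons b bs =>
      rw [markFirst] at h
      split at h
      · simp at h
      · rename_i hc
        cases hm : markFirst ts bs c with
        | some r => rw [hm] at h; simp at h
        | none =>
          have hf := ih bs c hm
          cases b with
          | true => simpa [unu] using hf
          | false =>
            have hne : PySem.List.pyGetD t 0 "" ≠ c := fun he => hc ⟨he, rfl⟩
            simp only [unu]
            rw [if_neg (by simp), List.find?_cons_of_neg (by simp [prT, hne])]
            exact hf

lemma markFirst_some (ts : List (List String)) : ∀ (used : List Bool) (c : String)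
    (t' : List String) (bs' : List Bool), markFirst ts used c = some (t', bs') →
    (unu ts used).find? (fun p => p.1 == c) = some (prT t') ∧
    unu ts bs' = (unu ts used).eraseP (fun p => p.1 == c) := by
  induction ts with
  | nil => intro used c t' bs' h; simp [markFirst] at h
  | cons t ts ih =>
    intro used c t' bs' h
    cases used with
    | nil => simp [markFirst] at h
    | cons b bs =>
      rw [markFirst] at h
      split at h
      · rename_i hc
        obtain ⟨hk, rfl⟩ := hc
        simp only [Option.some.injEq, Prod.mk.injEq] at h
        obtain ⟨rfl, rfl⟩ := h
        constructor
        · simp only [unu]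
          rw [if_neg (by simp), List.find?_cons_of_pos (by simp [prT, hk])]
        · simp [unu, prT, hk]
      · rename_i hc
        cases hm : markFirst ts bs c with
        | none => rw [hm] at h; simp at h
        | some r =>
          rw [hm] at h
          obtain ⟨t₀, bs₀⟩ := r
          simp only [Option.some.injEq, Prod.mk.injEq] at h
          obtain ⟨rfl, rfl⟩ := h
          obtain ⟨ihf, ihe⟩ := ih bs c _ _ hm
          cases b with
          | true => simpa [unu] using ⟨ihf, ihe⟩
          | false =>
            have hne : PySem.List.pyGetD t 0 "" ≠ c := fun he => hc ⟨he, rfl⟩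
            constructor
            · simp only [unu]
              rw [if_neg (by simp), List.find?_cons_of_neg (by simp [prT, hne])]
              exact ihf
            · simp only [unu]
              rw [if_neg (by simp), if_neg (by simp),
                List.eraseP_cons_of_neg (by simp [prT, hne])]
              exact congrArg (prT t :: ·) ihe

lemma unu_replicate (ts : List (List String)) :
    unu ts (List.replicate ts.length false) = ts.map prT := by
  induction ts with
  | nil => simp [unu]
  | cons t ts ih => simpa [unu, List.replicate] using ih

lemma walkW_none (rem : List (String × String)) (cur : String)
    (h : rem.find? (fun p => p.1 == cur) = none) : walkW rem cur = [] := by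
  rw [walkW]
  split
  · rfl
  · rename_i p hp; rw [h] at hp; cases hp

lemma walkW_some (rem : List (String × String)) (cur : String) (p : String × String)
    (h : rem.find? (fun p => p.1 == cur) = some p) :
    walkW rem cur = p.2 :: walkW (rem.eraseP (fun p => p.1 == cur)) p.2 := by
  rw [walkW]
  split
  · rename_i hp; rw [h] at hp; cases hp
  · rename_i q hq; rw [h] at hq; cases hq; rfl

lemma loopA_walk (S : List (List String)) : ∀ (n : Nat) (used : List Bool)
    (t : List String) (ans : List String), used.count false = n →
    loopA S [t] used ans =
      ans ++ PySem.List.pyGetD t 1 "" :: walkW (unu S used) (PySem.List.pyGetD t 1 "") := by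
  intro n
  induction n using Nat.strong_induction_on with
  | _ n ih =>
    intro used t ans hc
    rw [loopA]
    cases hm : markFirst S used (PySem.List.pyGetD t 1 "") with
    | none =>
      simp only [hm]
      rw [loopA, walkW_none _ _ (markFirst_none S used _ hm)]
    | some r =>
      obtain ⟨t', used'⟩ := r
      simp only [hm]
      obtain ⟨hf, he⟩ := markFirst_some S used _ t' used' hm
      have hcnt := markFirst_count S used _ t' used' hm
      rw [ih (used'.count false) (by omega) used' t' (ans ++ [PySem.List.pyGetD t 1 ""]) rfl]
      rw [walkW_some _ _ _ hf, ← he]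
      simp [prT]

lemma solution_eq_walk (tickets : List (List String)) :
    solution tickets = "ICN" ::
      walkW ((PySem.List.sorted2 tickets
        (fun x => PySem.List.pyGetD x 0 "") (fun x => PySem.List.pyGetD x 1 "")).map prT) "ICN" := by
  have hlen : (PySem.List.sorted2 tickets
      (fun x => PySem.List.pyGetD x 0 "") (fun x => PySem.List.pyGetD x 1 "")).length
      = tickets.length :=
    (PySem.List.sorted2_perm tickets _ _ false).length_eq
  have hun : unu (PySem.List.sorted2 tickets
      (fun x => PySem.List.pyGetD x 0 "") (fun x => PySem.List.pyGetD x 1 ""))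
      (List.replicate tickets.length false)
      = (PySem.List.sorted2 tickets
        (fun x => PySem.List.pyGetD x 0 "") (fun x => PySem.List.pyGetD x 1 "")).map prT := by
    rw [← hlen]; exact unu_replicate _
  unfold solution
  cases hm : markFirst (PySem.List.sorted2 tickets
      (fun x => PySem.List.pyGetD x 0 "") (fun x => PySem.List.pyGetD x 1 ""))
      (List.replicate tickets.length false) "ICN" with
  | none =>
    simp only [hm]
    rw [walkW_none _ _ (by rw [← hun]; exact markFirst_none _ _ _ hm)]
  | some r =>
    obtain ⟨t, used'⟩ := r
    simp only [hm]
    obtain ⟨hf, he⟩ := markFirst_some _ _ _ t used' hm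
    rw [loopA_walk _ (used'.count false) used' t _ rfl,
      walkW_some ((PySem.List.sorted2 tickets
          (fun x => PySem.List.pyGetD x 0 "") (fun x => PySem.List.pyGetD x 1 "")).map prT)
        "ICN" (prT t) (by rw [← hun]; exact hf), ← hun, ← he]
    simp [prT]

-- ---- B side ----

lemma filter_eraseP_self {α : Type} (p : α → Bool) (l : List α) :
    (l.eraseP p).filter p = (l.filter p).tail := by
  induction l with
  | nil => simp
  | cons a l ih =>
    cases hp : p a with
    | true =>
      rw [List.eraseP_cons_of_pos hp, List.filter_cons_of_pos hp]
      simp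
    | false =>
      rw [List.eraseP_cons_of_neg (by simp [hp]), List.filter_cons_of_neg (by simp [hp]),
        List.filter_cons_of_neg (by simp [hp])]
      exact ih

lemma filter_eraseP_of_disj {α : Type} (p q : α → Bool) (l : List α)
    (h : ∀ a, p a = true → q a = false) :
    (l.eraseP p).filter q = l.filter q := by
  induction l with
  | nil => simp
  | cons a l ih =>
    cases hp : p a with
    | true =>
      rw [List.eraseP_cons_of_pos hp, List.filter_cons_of_neg (by simp [h a hp])]
    | false =>
      rw [List.eraseP_cons_of_neg (by simp [hp])]
      cases hq : q a with
      | true => rw [List.filter_cons_of_pos hq, List.filter_cons_of_pos hq, ih]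
      | false => rw [List.filter_cons_of_neg (by simp [hq]), List.filter_cons_of_neg (by simp [hq]), ih]

lemma get?_mk_map {ν : Type} (l : List (String × ν)) (f : ν → ν) (c : String) :
    (PySem.Dict.mk (l.map (fun p => (p.1, f p.2)))).get? c = ((PySem.Dict.mk l).get? c).map f := by
  induction l with
  | nil => simp [PySem.Dict.get?]
  | cons a l ih =>
    obtain ⟨k, v⟩ := a
    simp only [List.map_cons]
    rw [PySem.Dict.get?_mk_cons, PySem.Dict.get?_mk_cons]
    split
    · simp
    · exact ih

lemma get?_mapVals {ν : Type} (d : PySem.Dict String ν) (f : ν → ν) (c : String) :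
    (PySem.Dict.mk (d.items.map (fun p => (p.1, f p.2)))).get? c = (d.get? c).map f :=
  get?_mk_map d.items f c

lemma dropLast_reverse_tail {α : Type} (l : List α) : l.dropLast.reverse = l.reverse.tail := by
  induction l using List.reverseRecOn with
  | nil => simp
  | append_singleton l a _ => simp

lemma loopB_walk : ∀ (fuel : Nat) (rem : List (String × String))
    (routes : PySem.Dict String (List String)) (cur : String) (ans : List String),
    (∀ c, ((routes.get? c).getD []).reverse = (rem.filter (fun p => p.1 == c)).map (·.2)) →
    rem.length ≤ fuel →
    loopB fuel routes cur ans = ans ++ walkW rem cur := by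
  intro fuel
  induction fuel with
  | zero =>
    intro rem routes cur ans hrel hlen
    have : rem = [] := List.length_eq_zero_iff.mp (Nat.le_zero.mp hlen)
    subst this
    rw [loopB, walkW_none _ _ (by simp)]
    simp
  | succ fuel ih =>
    intro rem routes cur ans hrel hlen
    rw [loopB]
    cases hl : (routes.get? cur).getD [] with
    | nil =>
      have h0 := hrel cur
      rw [hl] at h0
      have hfil : rem.filter (fun p => p.1 == cur) = [] := by
        have h0' : List.map (fun x : String × String => x.2)
            (rem.filter (fun p => p.1 == cur)) = [] := by rw [← h0]; rfl
        exact List.map_eq_nil_iff.mp h0' 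
      rw [walkW_none _ _ (by rw [← List.head?_filter, hfil]; rfl)]
      simp
    | cons d ds =>
      have h0 := hrel cur
      rw [hl] at h0
      -- the filtered remainder is nonempty; its head is the pair walked next
      cases hfil : rem.filter (fun p => p.1 == cur) with
      | nil => rw [hfil] at h0; simp at h0
      | cons f fs =>
        rw [hfil] at h0
        have hfind : rem.find? (fun p => p.1 == cur) = some f := by
          rw [← List.head?_filter, hfil]; rfl
        have hmemf : f ∈ rem := List.mem_of_find?_eq_some hfind
        have hpf : (f.1 == cur) = true := List.find?_some (p := fun p : String × String => p.1 == cur) hfind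
        -- the popped last element is f.2
        have hnxt : (d :: ds).getLast (by simp) = f.2 := by
          have h1 : (d :: ds).getLast? = some ((d :: ds).getLast (by simp)) :=
            List.getLast?_eq_some_getLast _
          rw [List.getLast?_eq_head?_reverse, h0] at h1
          simp only [List.map_cons, List.head?_cons] at h1
          exact (Option.some.inj h1).symm
        have herase : ∀ c, (((routes.insert cur (d :: ds).dropLast).get? c).getD []).reverse
            = ((rem.eraseP (fun p => p.1 == cur)).filter (fun p => p.1 == c)).map (·.2) := by
          intro c
          by_cases hc : c = cur
          · subst hc
            rw [PySem.Dict.get?_insert_self]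
            rw [filter_eraseP_self]
            simp only [Option.getD_some]
            rw [dropLast_reverse_tail, h0]
            simp [hfil]
          · rw [PySem.Dict.get?_insert_of_ne _ _ hc,
              filter_eraseP_of_disj _ _ _ (fun a ha => by
                have : a.1 = cur := by simpa using ha
                simp [this, Ne.symm hc])]
            exact hrel c
        have hlen' : (rem.eraseP (fun p => p.1 == cur)).length ≤ fuel := by
          have := List.length_eraseP_of_mem (p := fun p : String × String => p.1 == cur) hmemf hpf
          have hpos : 0 < rem.length := List.length_pos_of_mem hmemf
          omega
        show loopB fuel (routes.insert cur (d :: ds).dropLast) ((d :: ds).getLast (by simp))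
            (ans ++ [(d :: ds).getLast (by simp)]) = ans ++ walkW rem cur
        rw [ih _ _ _ _ herase hlen', walkW_some rem cur f hfind, hnxt]
        simp

lemma sorted2_eq_sorted_lex {α : Type} (xs : List α) (k1 k2 : α → String) :
    PySem.List.sorted2 xs k1 k2 =
    PySem.List.sorted xs (fun a => (toLex (k1 a, k2 a) : Lex (String × String))) := by
  have hb : (fun a b => (decide (k1 a < k1 b) || (!decide (k1 b < k1 a) && decide (k2 a < k2 b))))
      = (fun a b => decide ((toLex (k1 a, k2 a) : Lex (String × String)) < toLex (k1 b, k2 b))) := by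
    funext a b
    rcases lt_trichotomy (k1 a) (k1 b) with h | h | h
    · simp [h, Prod.Lex.lt_iff, asymm h]
    · simp [h, Prod.Lex.lt_iff]
    · simp [h, Prod.Lex.lt_iff, asymm h, h.ne']
  simp only [PySem.List.sorted2, PySem.List.sorted, if_neg (by simp : ¬ (false = true))]
  rw [hb]

lemma city_sorted (tickets : List (List String)) (c : String) :
    (PySem.List.sorted (((tickets.map prT).filter (fun p => p.1 == c)).map (·.2))
        (fun x => x) true).reverse
    = (((PySem.List.sorted2 tickets (fun x => PySem.List.pyGetD x 0 "")
          (fun x => PySem.List.pyGetD x 1 "")).map prT).filter (fun p => p.1 == c)).map (·.2) := by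
  set S := PySem.List.sorted2 tickets (fun x => PySem.List.pyGetD x 0 "")
      (fun x => PySem.List.pyGetD x 1 "") with hS
  apply PySem.List.eq_of_perm_of_pairwise_le_of_injective (fun x : String => x) Function.injective_id
  · -- both are permutations of the same multiset of destinations
    have h1 : (PySem.List.sorted (((tickets.map prT).filter (fun p => p.1 == c)).map (·.2))
        (fun x => x) true).Perm (((tickets.map prT).filter (fun p => p.1 == c)).map (·.2)) :=
      PySem.List.sorted_perm _ _ _
    have h2 : (S.map prT).Perm (tickets.map prT) :=
      (PySem.List.sorted2_perm tickets _ _ false).map prT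
    exact ((List.reverse_perm _).trans h1).trans (((h2.filter _).map _).symm)
  · rw [List.pairwise_reverse]
    exact PySem.List.sorted_pairwise_rev _ _
  · -- the destinations of a single city appear in S in ascending order
    rw [hS, sorted2_eq_sorted_lex, List.filter_map, List.pairwise_map, List.pairwise_map]
    have hp : (PySem.List.sorted tickets
        (fun a => (toLex (PySem.List.pyGetD a 0 "", PySem.List.pyGetD a 1 "") : Lex (String × String)))
        false).Pairwise (fun a b =>
          (toLex (PySem.List.pyGetD a 0 "", PySem.List.pyGetD a 1 "") : Lex (String × String))
          ≤ toLex (PySem.List.pyGetD b 0 "", PySem.List.pyGetD b 1 "")) :=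
      PySem.List.sorted_pairwise _ _
    refine List.Pairwise.imp_of_mem ?_ (hp.filter _)
    intro a b ha hb hab
    have ha' : PySem.List.pyGetD a 0 "" = c := by
      have := (List.mem_filter.mp ha).2; simpa [prT] using this
    have hb' : PySem.List.pyGetD b 0 "" = c := by
      have := (List.mem_filter.mp hb).2; simpa [prT] using this
    rw [Prod.Lex.le_iff] at hab
    simp only [ofLex_toLex] at hab
    rcases hab with h | ⟨-, h⟩
    · rw [ha', hb'] at h; exact absurd h (lt_irrefl c)
    · exact h

lemma solution_alt_eq_walk (tickets : List (List String)) :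
    solution_alt tickets = "ICN" ::
      walkW ((PySem.List.sorted2 tickets
        (fun x => PySem.List.pyGetD x 0 "") (fun x => PySem.List.pyGetD x 1 "")).map prT) "ICN" := by
  have hrel : ∀ c, (((PySem.Dict.mk ((tickets.foldl
        (fun d t => d.modify (PySem.List.pyGetD t 0 "") [] (· ++ [PySem.List.pyGetD t 1 ""]))
        PySem.Dict.empty).items.map
          (fun p => (p.1, PySem.List.sorted p.2 (fun x => x) true)))).get? c).getD []).reverse
      = (((PySem.List.sorted2 tickets (fun x => PySem.List.pyGetD x 0 "")
          (fun x => PySem.List.pyGetD x 1 "")).map prT).filter (fun p => p.1 == c)).map (·.2) := by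
    intro c
    rw [get?_mapVals (tickets.foldl
        (fun d t => d.modify (PySem.List.pyGetD t 0 "") [] (· ++ [PySem.List.pyGetD t 1 ""]))
        PySem.Dict.empty) (fun v => PySem.List.sorted v (fun x => x) true) c]
    have hv : (tickets.foldl
        (fun d t => d.modify (PySem.List.pyGetD t 0 "") [] (· ++ [PySem.List.pyGetD t 1 ""]))
        PySem.Dict.empty).getD c []
        = ((tickets.map prT).filter (fun p => p.1 == c)).map (·.2) := by
      have hfold : tickets.foldl
          (fun d t => d.modify (PySem.List.pyGetD t 0 "") [] (· ++ [PySem.List.pyGetD t 1 ""]))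
          PySem.Dict.empty
          = (tickets.map prT).foldl (fun d p => d.modify p.1 [] (· ++ [p.2])) PySem.Dict.empty := by
        rw [List.foldl_map]; rfl
      rw [hfold, PySem.Dict.getD_foldl_modify_append]
      simp
    have hD : ((tickets.foldl
        (fun d t => d.modify (PySem.List.pyGetD t 0 "") [] (· ++ [PySem.List.pyGetD t 1 ""]))
        PySem.Dict.empty).get? c |>.map
          (fun v => PySem.List.sorted v (fun x => x) true)).getD []
        = PySem.List.sorted (((tickets.map prT).filter (fun p => p.1 == c)).map (·.2))
            (fun x => x) true := by
      cases hg : (tickets.foldl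
          (fun d t => d.modify (PySem.List.pyGetD t 0 "") [] (· ++ [PySem.List.pyGetD t 1 ""]))
          PySem.Dict.empty).get? c with
      | none =>
        have hnone := PySem.Dict.getD_of_get?_eq_none _ ([] : List String) hg
        rw [hnone] at hv
        rw [← hv]
        rfl
      | some v =>
        have hsome := PySem.Dict.getD_of_get?_eq_some _ ([] : List String) hg
        rw [hsome] at hv
        rw [hv]
        rfl
    rw [hD, city_sorted]
  have hlen : ((PySem.List.sorted2 tickets (fun x => PySem.List.pyGetD x 0 "")
      (fun x => PySem.List.pyGetD x 1 "")).map prT).length ≤ tickets.length := by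
    simp [(PySem.List.sorted2_perm tickets _ _ false).length_eq]
  unfold solution_alt
  rw [loopB_walk tickets.length ((PySem.List.sorted2 tickets
      (fun x => PySem.List.pyGetD x 0 "") (fun x => PySem.List.pyGetD x 1 "")).map prT)
    _ "ICN" ["ICN"] hrel hlen]
  rfl

-- ===== VERDICT (by name: the statement is the Claim_ definition above) =====
theorem solution_spec : Claim_equal_solution := by
  intro tickets _ _
  unfold Spec_solution
  rw [solution_eq_walk, solution_alt_eq_walk]
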